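-- pv_equiv track=rewrite | github.com/Zemke/euler100 | 12.py | ff_count
-- ===== SOURCE A (Python) =====
-- def ff_count(factors):
--   F = {}
--   for f in factors:
--     if f not in F:
--       F[f] = 1
--     F[f] += 1
--   res = 1
--   for f in F.values():
--     res *= f
--   return res
-- ===== SOURCE B (Python) =====
-- def ff_count(factors):
--   # Sort, then one run-length pass: multiply (run length + 1) per group.
--   res = 1
--   run = 0
--   prev = None
--   for f in sorted(factors):
--     if f == prev:
--       run += 1
--     else:
--       res *= run + 1
--       run = 1
--       prev = f
--   return res * (run + 1)
-- ===== Notes on version B (the rewrite author's own statement) =====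
-- stated objective: alternative
-- what changed: Replaced the hash-map occurrence count (dict built in one loop, values multiplied in a second) by a sort-then-run-length single pass: iterate over sorted(factors), track the previous element and current run length, and multiply the accumulator by (run+1) at each group boundary.
import Mathlib
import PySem

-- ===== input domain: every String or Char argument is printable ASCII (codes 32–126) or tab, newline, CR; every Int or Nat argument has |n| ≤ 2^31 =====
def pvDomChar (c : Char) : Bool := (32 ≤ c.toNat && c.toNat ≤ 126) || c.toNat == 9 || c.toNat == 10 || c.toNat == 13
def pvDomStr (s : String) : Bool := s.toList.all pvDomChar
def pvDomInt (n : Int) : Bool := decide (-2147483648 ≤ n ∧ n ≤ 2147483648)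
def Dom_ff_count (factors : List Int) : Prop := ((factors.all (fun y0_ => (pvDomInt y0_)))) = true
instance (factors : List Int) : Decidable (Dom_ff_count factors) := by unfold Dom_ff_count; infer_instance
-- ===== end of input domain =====

-- B replaces A's dict-of-counts with a sort-then-run-length pass (alternative decomposition, not claimed faster).

-- ===== PORT A =====
def ff_count (factors : List Int) : Int :=
  let F := factors.foldl (fun F f =>
    let F := if F.contains f then F else F.insert f (1 : Int)
    F.insert f (F.getD f 0 + 1)) PySem.Dict.empty
  F.values.foldl (fun res f => res * f) 1

-- ===== PORT B =====
def ff_count_alt (factors : List Int) : Int :=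
  let st := (PySem.List.sorted factors (fun v => v) false).foldl
    (fun (st : Int × Int × Option Int) f =>
      if some f = st.2.2 then (st.1, st.2.1 + 1, st.2.2)
      else (st.1 * (st.2.1 + 1), 1, some f)) ((1 : Int), (0 : Int), (none : Option Int))
  st.1 * (st.2.1 + 1)

-- ===== PRECONDITION & SPEC =====
def Spec_ff_count (factors : List Int) (out : Int) : Prop := out = ff_count_alt factors
instance (factors : List Int) (out : Int) : Decidable (Spec_ff_count factors out) := by unfold Spec_ff_count; infer_instance

-- ===== CLAIM (what is proved, stated in full; the proofs are below) =====
def Claim_equal_ff_count : Prop := ∀ (factors : List Int), Dom_ff_count factors → Spec_ff_count factors (ff_count factors)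

-- ===== LEMMAS AND PROOFS =====

-- the common value: product of (count + 1) over the distinct elements of l
def pvPhi (l : List Int) : Int :=
  ((PySem.List.dedup l).map (fun y => (l.count y : Int) + 1)).prod

-- A's loop body is a single insert
lemma stepA_eq (d : PySem.Dict Int Int) (f : Int) :
    (let d' := if d.contains f then d else d.insert f (1 : Int)
     d'.insert f (d'.getD f 0 + 1)) =
    d.insert f (if d.contains f then d.getD f 0 + 1 else 2) := by
  by_cases h : d.contains f <;>
    simp [h, PySem.Dict.getD_insert_self, PySem.Dict.insert_insert_self]

def stepA (d : PySem.Dict Int Int) (f : Int) : PySem.Dict Int Int :=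
  d.insert f (if d.contains f then d.getD f 0 + 1 else 2)

lemma foldA_eq (l : List Int) (d : PySem.Dict Int Int) :
    l.foldl (fun F f =>
      let F := if F.contains f then F else F.insert f (1 : Int)
      F.insert f (F.getD f 0 + 1)) d = l.foldl stepA d := by
  induction l generalizing d with
  | nil => rfl
  | cons x t ih => simpa [stepA_eq, stepA] using ih _

lemma keys_foldA (l : List Int) :
    (l.foldl stepA PySem.Dict.empty).keys = PySem.Set.ofList l := by
  simpa [stepA, PySem.Set.update_nil_left] using
    PySem.Dict.keys_foldl_insert l (fun d f => if d.contains f then d.getD f 0 + 1 else 2)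
      PySem.Dict.empty

lemma nodup_keys_foldA (l : List Int) :
    (l.foldl stepA PySem.Dict.empty).keys.Nodup := by
  rw [keys_foldA]; exact PySem.Set.nodup_ofList l

lemma getD_foldA (l : List Int) (v : Int) :
    (l.foldl stepA PySem.Dict.empty).getD v 0 =
      if v ∈ l then (l.count v : Int) + 1 else 0 := by
  induction l using List.reverseRecOn with
  | nil => simp [PySem.Dict.getD_empty]
  | append_singleton t x ih =>
      rw [List.foldl_append]
      simp only [List.foldl_cons, List.foldl_nil, stepA]
      rw [PySem.Dict.getD_insert]
      have hc : (t.foldl stepA PySem.Dict.empty).contains x = decide (x ∈ t) := by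
        rw [PySem.Dict.contains_eq_decide_mem_keys, keys_foldA]
        simp [PySem.Set.mem_ofList]
      by_cases hvx : v = x
      · subst hvx
        rw [hc, ih]
        by_cases hm : v ∈ t
        · simp [hm, List.count_append]
        · simp [hm, List.count_append, List.count_eq_zero_of_not_mem hm]
      · have hxv : ¬ x = v := fun h => hvx h.symm
        rw [if_neg hvx, ih]
        have hcnt : (t ++ [x]).count v = t.count v := by
          have h0 : List.count v [x] = 0 := by
            simp only [List.count_cons, List.count_nil]
            simp [hxv]
          rw [List.count_append, h0]
          omega
        by_cases hm : v ∈ t <;> simp [hm, hvx, hcnt]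

lemma ff_count_eq_phi (l : List Int) : ff_count l = pvPhi l := by
  show (l.foldl (fun F f =>
    let F := if F.contains f then F else F.insert f (1 : Int)
    F.insert f (F.getD f 0 + 1)) PySem.Dict.empty).values.foldl (fun res f => res * f) 1 = pvPhi l
  rw [foldA_eq]
  have hv : (l.foldl stepA PySem.Dict.empty).values =
      (PySem.Set.ofList l).map (fun k => (l.count k : Int) + 1) := by
    rw [PySem.Dict.values_eq_map_keys _ (nodup_keys_foldA l) 0, keys_foldA]
    refine List.map_congr_left ?_
    intro k hk
    rw [getD_foldA, if_pos ((PySem.Set.mem_ofList l k).mp hk)]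
  rw [hv, ← List.prod_eq_foldl]
  unfold pvPhi
  simp [PySem.List.dedup_eq_ofList]

-- pvPhi peels off one group
lemma phi_cons (f : Int) (t : List Int) :
    pvPhi (f :: t) =
      (((f :: t).count f : Int) + 1) * pvPhi (t.filter (fun y => decide (y ≠ f))) := by
  classical
  set u := t.filter (fun y => decide (y ≠ f)) with hu
  have hfu : f ∉ u := by simp [hu]
  have hnodup2 : (f :: PySem.List.dedup u).Nodup := by
    refine List.nodup_cons.mpr ⟨?_, PySem.List.nodup_dedup u⟩
    intro h
    exact hfu ((PySem.List.mem_dedup u f).mp h)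
  have hperm : (PySem.List.dedup (f :: t)).Perm (f :: PySem.List.dedup u) := by
    rw [List.perm_ext_iff_of_nodup (PySem.List.nodup_dedup _) hnodup2]
    intro a
    by_cases haf : a = f <;>
      simp [hu, haf]
  unfold pvPhi
  rw [List.Perm.prod_eq (hperm.map _), List.map_cons, List.prod_cons]
  congr 1
  apply congrArg List.prod
  refine List.map_congr_left ?_
  intro y hy
  have hyu : y ∈ u := (PySem.List.mem_dedup u y).mp hy
  have hyf : y ≠ f := by
    rcases List.mem_filter.mp (hu ▸ hyu) with ⟨_, hp⟩
    simpa using of_decide_eq_true hp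
  have hfy : f ≠ y := fun h => hyf h.symm
  have h1 : (f :: t).count y = t.count y := by
    simp [hfy]
  have h2 : u.count y = t.count y := by
    rw [hu, List.count_filter]
    simp [hyf]
  rw [h1, h2]

-- B's loop invariant on a sorted suffix
lemma loopB (s : List Int) : ∀ (x res run : Int),
    s.Pairwise (· ≤ ·) → (∀ y ∈ s, x ≤ y) →
    (let st := s.foldl
      (fun (st : Int × Int × Option Int) f =>
        if some f = st.2.2 then (st.1, st.2.1 + 1, st.2.2)
        else (st.1 * (st.2.1 + 1), 1, some f)) (res, run, some x)
     st.1 * (st.2.1 + 1)) =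
    res * ((run + (s.count x : Int)) + 1) * pvPhi (s.filter (fun y => decide (y ≠ x))) := by
  induction s with
  | nil => intro x res run _ _; simp [pvPhi, PySem.List.dedup]
  | cons f t ih =>
      intro x res run hp hx
      have hpt : t.Pairwise (· ≤ ·) := (List.pairwise_cons.mp hp).2
      have hft : ∀ y ∈ t, f ≤ y := (List.pairwise_cons.mp hp).1
      simp only [List.foldl_cons]
      by_cases hfx : f = x
      · subst hfx
        rw [if_pos rfl]
        have := ih f res (run + 1) hpt hft
        simp only at this ⊢
        rw [this]
        have hcnt : ((f :: t).count f : Int) = (t.count f : Int) + 1 := by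
          simp
        have hfilt : (f :: t).filter (fun y => decide (y ≠ f)) = t.filter (fun y => decide (y ≠ f)) := by
          simp
        rw [hcnt, hfilt]; ring
      · rw [if_neg (by simpa using hfx)]
        have := ih f (res * (run + 1)) 1 hpt hft
        simp only at this ⊢
        rw [this]
        have hxs : x ∉ (f :: t) := by
          intro hm
          rcases List.mem_cons.mp hm with h | h
          · exact hfx h.symm
          · exact hfx (le_antisymm (hx f (List.mem_cons_self)) (hft x h)).symm
        have hcnt0 : (f :: t).count x = 0 := List.count_eq_zero.mpr hxs
        have hfilt : (f :: t).filter (fun y => decide (y ≠ x)) = f :: t := by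
          refine List.filter_eq_self.mpr ?_
          intro y hy
          exact decide_eq_true (fun h => hxs (by rw [← h]; exact hy))
        have hc1 : ((f :: t).count f : Int) = (t.count f : Int) + 1 := by
          simp
        rw [hcnt0, hfilt, phi_cons f t, hc1]
        push_cast
        ring

-- pvPhi is invariant under permutation
lemma phi_congr_perm (s l : List Int) (h : s.Perm l) : pvPhi s = pvPhi l := by
  unfold pvPhi
  have hperm : (PySem.List.dedup s).Perm (PySem.List.dedup l) := by
    rw [List.perm_ext_iff_of_nodup (PySem.List.nodup_dedup _) (PySem.List.nodup_dedup _)]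
    intro a
    simp [h.mem_iff]
  calc ((PySem.List.dedup s).map (fun y => (s.count y : Int) + 1)).prod
      = ((PySem.List.dedup s).map (fun y => (l.count y : Int) + 1)).prod := by
        refine congrArg List.prod (List.map_congr_left ?_)
        intro y _
        rw [h.count_eq]
    _ = ((PySem.List.dedup l).map (fun y => (l.count y : Int) + 1)).prod :=
        List.Perm.prod_eq (hperm.map _)

lemma ff_count_alt_eq_phi (l : List Int) : ff_count_alt l = pvPhi l := by
  have hperm := PySem.List.sorted_perm l (fun v => v) false
  rw [← phi_congr_perm _ _ hperm]
  have hs : (PySem.List.sorted l (fun v => v) false).Pairwise (· ≤ ·) := by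
    simpa using PySem.List.sorted_pairwise l (fun v => v)
  unfold ff_count_alt
  generalize PySem.List.sorted l (fun v => v) false = s at hs ⊢
  cases s with
  | nil => simp [pvPhi, PySem.List.dedup]
  | cons f t =>
      have hpt : t.Pairwise (· ≤ ·) := (List.pairwise_cons.mp hs).2
      have hft : ∀ y ∈ t, f ≤ y := (List.pairwise_cons.mp hs).1
      simp only [List.foldl_cons]
      rw [if_neg (Option.some_ne_none f)]
      have := loopB t f (1 * (0 + 1)) 1 hpt hft
      simp only at this ⊢
      rw [this]
      have hc1 : ((f :: t).count f : Int) = (t.count f : Int) + 1 := by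
        simp
      rw [phi_cons f t, hc1]
      ring

-- ===== VERDICT (by name: the statement is the Claim_ definition above) =====
theorem ff_count_spec : Claim_equal_ff_count := by
  intro factors _
  show ff_count factors = ff_count_alt factors
  rw [ff_count_eq_phi, ff_count_alt_eq_phi]
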